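-- pv_equiv track=rewrite | github.com/Msg05/gfg | Difficulty: Basic/Sum of Digit is Palindrome or not/sum-of-digit-is-palindrome-or-not.py | isDigitSumPalindrome
-- ===== SOURCE A (Python) =====
-- def isDigitSumPalindrome(n):
--     # Step 1: Find sum of digits
--     digit_sum = 0
--     while n > 0:
--         digit_sum += n % 10
--         n //= 10
--
--     # Step 2: Reverse the digit_sum mathematically
--     original = digit_sum
--     reverse_num = 0
--     while digit_sum > 0:
--         reverse_num = reverse_num * 10 + digit_sum % 10
--         digit_sum //= 10
--
--     # Step 3: Compare original with reversed
--     return original == reverse_num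
-- ===== SOURCE B (Python) =====
-- def isDigitSumPalindrome(n):
--     digit_sum = sum(int(c) for c in str(n)) if n > 0 else 0
--     s = str(digit_sum)
--     return s == s[::-1]
-- ===== Notes on version B (the rewrite author's own statement) =====
-- stated objective: idiomatic
-- what changed: Replaces both arithmetic while-loops (digit extraction by %10///10 and mathematical number reversal) with string-based code: the digit sum is summed over the characters of str(n) and the palindrome test is s == s[::-1] on str(digit_sum).
import Mathlib
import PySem

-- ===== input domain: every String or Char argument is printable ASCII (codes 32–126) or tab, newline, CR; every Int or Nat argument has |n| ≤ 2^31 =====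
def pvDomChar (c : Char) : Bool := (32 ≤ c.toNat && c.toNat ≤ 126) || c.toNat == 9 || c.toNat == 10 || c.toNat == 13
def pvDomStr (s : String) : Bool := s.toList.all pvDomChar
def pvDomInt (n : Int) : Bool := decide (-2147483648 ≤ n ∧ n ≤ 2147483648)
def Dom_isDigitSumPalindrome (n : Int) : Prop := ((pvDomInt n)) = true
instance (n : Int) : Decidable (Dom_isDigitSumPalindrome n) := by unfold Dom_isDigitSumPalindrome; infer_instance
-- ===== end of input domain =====

-- B replaces A's two arithmetic while-loops by string-based code (digit sum over str(n),
-- palindrome test s == s[::-1] on str(digit_sum)); same values everywhere, no speed claim.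

-- ===== PORT A =====
-- `while n > 0: digit_sum += n % 10; n //= 10`; fuel = n.toNat bounds the iteration count (totality guard only)
def aSumLoop : Nat → Int → Int → Int
  | 0, _, digit_sum => digit_sum
  | fuel + 1, n, digit_sum =>
      if 0 < n then aSumLoop fuel (PySem.Int.floordiv n 10) (digit_sum + PySem.Int.mod n 10)
      else digit_sum

-- `while digit_sum > 0: reverse_num = reverse_num * 10 + digit_sum % 10; digit_sum //= 10`
def aRevLoop : Nat → Int → Int → Int
  | 0, _, reverse_num => reverse_num
  | fuel + 1, digit_sum, reverse_num =>
      if 0 < digit_sum then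
        aRevLoop fuel (PySem.Int.floordiv digit_sum 10) (reverse_num * 10 + PySem.Int.mod digit_sum 10)
      else reverse_num

def isDigitSumPalindrome (n : Int) : Bool :=
  let digit_sum := aSumLoop n.toNat n 0
  let original := digit_sum
  let reverse_num := aRevLoop digit_sum.toNat digit_sum 0
  decide (original = reverse_num)

-- ===== PORT B =====
def isDigitSumPalindrome_alt (n : Int) : Bool :=
  -- digit_sum = sum(int(c) for c in str(n)) if n > 0 else 0  (int(c) never raises here: str(n) is all digits)
  let digit_sum : Int :=
    if 0 < n then ((PySem.Int.toChars n).map (fun c => (PySem.Int.ofChars? [c]).getD 0)).sum else 0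
  -- s = str(digit_sum); return s == s[::-1]
  let s := PySem.Int.toChars digit_sum
  decide (s = (PySem.List.slice? s none none (-1)).getD [])

-- ===== PRECONDITION & SPEC =====
def Spec_isDigitSumPalindrome (n : Int) (out : Bool) : Prop := out = isDigitSumPalindrome_alt n
instance (n : Int) (out : Bool) : Decidable (Spec_isDigitSumPalindrome n out) := by unfold Spec_isDigitSumPalindrome; infer_instance

-- ===== CLAIM (what is proved, stated in full; the proofs are below) =====
def Claim_equal_isDigitSumPalindrome : Prop := ∀ (n : Int), Dom_isDigitSumPalindrome n → Spec_isDigitSumPalindrome n (isDigitSumPalindrome n)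

-- ===== LEMMAS AND PROOFS =====

-- reference digit sum of a natural number
def sumDig (m : Nat) : Nat :=
  if h : m = 0 then 0 else m % 10 + sumDig (m / 10)
decreasing_by exact Nat.div_lt_self (Nat.pos_of_ne_zero h) (by omega)

lemma aSumLoop_eq (fuel : Nat) : ∀ (m : Nat) (acc : Int), m ≤ fuel →
    aSumLoop fuel (m : Int) acc = acc + (sumDig m : Int) := by
  induction fuel with
  | zero =>
    intro m acc hm
    interval_cases m
    simp [aSumLoop, sumDig]
  | succ f ih =>
    intro m acc hm
    by_cases h0 : m = 0
    · subst h0; simp [aSumLoop, sumDig]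
    · have hpos : 0 < m := Nat.pos_of_ne_zero h0
      rw [show ((f + 1 : Nat)) = f + 1 from rfl]
      simp only [aSumLoop, if_pos (by exact_mod_cast hpos : (0:Int) < (m:Int))]
      rw [show PySem.Int.floordiv (m : Int) 10 = ((m / 10 : Nat) : Int) from
            PySem.Int.floordiv_natCast m 10,
          show PySem.Int.mod (m : Int) 10 = ((m % 10 : Nat) : Int) from
            PySem.Int.mod_natCast m 10]
      rw [ih (m / 10) _ (by omega)]
      have hs : sumDig m = m % 10 + sumDig (m / 10) := by rw [sumDig]; simp [h0]
      rw [hs]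
      push_cast
      ring

lemma digit_int_of_lt_ten : ∀ d : Nat, d < 10 →
    ((PySem.Int.ofChars? [Nat.digitChar d]).getD 0) = (d : Int) := by decide

lemma toDigits_sum_eq (m : Nat) :
    ((Nat.toDigits 10 m).map (fun c => (PySem.Int.ofChars? [c]).getD 0)).sum = (sumDig m : Int) := by
  induction m using Nat.strong_induction_on with
  | _ m ih =>
    by_cases hm : m < 10
    · rw [Nat.toDigits_of_lt_base hm]
      simp only [List.map_cons, List.map_nil, List.sum_cons, List.sum_nil, add_zero]
      rw [digit_int_of_lt_ten m hm]
      rcases Nat.eq_zero_or_pos m with h0 | h0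
      · subst h0; simp [sumDig]
      · rw [sumDig, dif_neg (by omega)]
        rw [sumDig, dif_pos (by omega)]
        have : m % 10 = m := Nat.mod_eq_of_lt hm
        omega
    · have hge : 10 ≤ m := by omega
      rw [Nat.toDigits_of_base_le (by omega) hge]
      rw [List.map_append, List.sum_append]
      rw [ih (m / 10) (Nat.div_lt_self (by omega) (by omega))]
      simp only [List.map_cons, List.map_nil, List.sum_cons, List.sum_nil, add_zero]
      rw [digit_int_of_lt_ten (m % 10) (Nat.mod_lt _ (by omega))]
      have hs : sumDig m = m % 10 + sumDig (m / 10) := by rw [sumDig]; simp; omega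
      rw [hs]
      push_cast
      ring

lemma sumDig_bound : ∀ (k m : Nat), m < 10 ^ k → sumDig m ≤ 9 * k := by
  intro k
  induction k with
  | zero => intro m hm; interval_cases m; simp [sumDig]
  | succ k ih =>
    intro m hm
    by_cases h0 : m = 0
    · subst h0; simp [sumDig]
    · rw [sumDig, dif_neg h0]
      have h1 : m / 10 < 10 ^ k := by
        rw [pow_succ] at hm
        exact (Nat.div_lt_iff_lt_mul (by omega)).mpr hm
      have := ih (m / 10) h1
      have : m % 10 < 10 := Nat.mod_lt _ (by omega)
      omega

lemma pal_eq : ∀ d : Nat, d < 100 →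
    (decide ((d : Int) = aRevLoop ((d : Int)).toNat (d : Int) 0)) =
    (decide (PySem.Int.toChars (d : Int) =
      (PySem.List.slice? (PySem.Int.toChars (d : Int)) none none (-1)).getD [])) := by decide

-- ===== VERDICT (by name: the statement is the Claim_ definition above) =====
theorem isDigitSumPalindrome_spec : Claim_equal_isDigitSumPalindrome := by
  unfold Claim_equal_isDigitSumPalindrome Spec_isDigitSumPalindrome
  intro n hdom
  by_cases hn : 0 < n
  · have hm : n = ((n.toNat : Nat) : Int) := by omega
    set m : Nat := n.toNat with hmdef
    have hA : aSumLoop n.toNat n 0 = (sumDig m : Int) := by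
      rw [hm]
      simpa using aSumLoop_eq m m 0 le_rfl
    have hB : (if 0 < n then ((PySem.Int.toChars n).map (fun c => (PySem.Int.ofChars? [c]).getD 0)).sum else 0) = (sumDig m : Int) := by
      rw [if_pos hn, hm]
      have htc : PySem.Int.toChars ((m : Nat) : Int) = Nat.toDigits 10 m := by
        simp [PySem.Int.toChars]
      rw [htc, toDigits_sum_eq]
    have hbound : sumDig m < 100 := by
      have hlt : m < 10 ^ 10 := by
        have hn2 : n ≤ 2147483648 := by
          simp only [Dom_isDigitSumPalindrome, pvDomInt, decide_eq_true_eq] at hdom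
          exact hdom.2
        omega
      have := sumDig_bound 10 m hlt
      omega
    simp only [isDigitSumPalindrome, isDigitSumPalindrome_alt]
    rw [hA, hB]
    have : ((sumDig m : Int)).toNat = sumDig m := by omega
    simpa using pal_eq (sumDig m) hbound
  · have h0 : n.toNat = 0 := by omega
    simp only [isDigitSumPalindrome, isDigitSumPalindrome_alt, h0, if_neg hn]
    rw [show aSumLoop 0 n 0 = 0 from rfl]
    decide
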